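-- pv_equiv track=rewrite | github.com/paiml/depyler | examples/hard_prac_fs_defrag.py | df_largest_free_run
-- ===== SOURCE A (Python) =====
-- def df_largest_free_run(disk: list[int], total: int) -> int:
--     """Find largest contiguous free run."""
--     best: int = 0
--     current: int = 0
--     i: int = 0
--     while i < total:
--         b: int = disk[i]
--         if b == 0:
--             current = current + 1
--             if current > best:
--                 best = current
--         else:
--             current = 0
--         i = i + 1
--     return best
-- ===== SOURCE B (Python) =====
-- def df_largest_free_run(disk: list[int], total: int) -> int:
--     """Find largest contiguous free run."""
--     n = max(total, 0)
--     return _max_gap(disk[:n])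
--
--
-- def _max_gap(prefix: list[int]) -> int:
--     # positions of occupied blocks, fenced by -1 and len(prefix);
--     # the largest free run is the largest gap between adjacent fences.
--     barriers = [-1] + [i for i, b in enumerate(prefix) if b != 0] + [len(prefix)]
--     return max(j - i - 1 for i, j in zip(barriers, barriers[1:]))
-- ===== Notes on version B (the rewrite author's own statement) =====
-- stated objective: alternative
-- what changed: Replaces A's running best/current counter loop with a barrier decomposition: collect the positions of non-zero blocks (fenced by -1 and the prefix length) and return the largest gap between adjacent barriers; B clamps the bound instead of indexing, so it never raises.
-- outside the precondition, e.g. on df_largest_free_run([0], 2): A raises IndexError, B returns 1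
import Mathlib
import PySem

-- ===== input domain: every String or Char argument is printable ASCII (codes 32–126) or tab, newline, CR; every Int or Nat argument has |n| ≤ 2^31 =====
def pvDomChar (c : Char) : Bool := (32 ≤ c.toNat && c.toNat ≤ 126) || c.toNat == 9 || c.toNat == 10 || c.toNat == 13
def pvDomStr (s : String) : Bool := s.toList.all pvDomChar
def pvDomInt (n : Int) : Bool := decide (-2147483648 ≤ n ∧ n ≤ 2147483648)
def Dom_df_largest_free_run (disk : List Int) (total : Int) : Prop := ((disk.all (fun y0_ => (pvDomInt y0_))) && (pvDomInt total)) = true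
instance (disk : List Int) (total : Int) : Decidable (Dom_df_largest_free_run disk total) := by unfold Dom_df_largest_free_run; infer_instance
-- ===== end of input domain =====

-- B replaces A's running best/current counter loop with a barrier decomposition (gaps
-- between non-zero positions) and clamps the bound instead of indexing (objective: alternative).


-- ===== PORT A =====
-- while i < total: … runs exactly total.toNat iterations; pyGet? none = IndexError (excluded by Pre_)
def dfLoopA (disk : List Int) : Nat → Int → Int → Int → Int
  | 0, _i, best, _current => best
  | Nat.succ fuel, i, best, current =>
    match PySem.List.pyGet? disk i with
    | none => best  -- IndexError; these inputs are outside Pre_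
    | some b =>
      if b = 0 then
        dfLoopA disk fuel (i + 1) (if current + 1 > best then current + 1 else best) (current + 1)
      else
        dfLoopA disk fuel (i + 1) best 0

def df_largest_free_run (disk : List Int) (total : Int) : Int :=
  dfLoopA disk total.toNat 0 0 0

-- ===== PORT B =====
-- helper _max_gap of Source B
def dfMaxGap (pre : List Int) : Int :=
  let barriers : List Int :=
    [-1] ++ ((PySem.List.enumerate pre 0).filter (fun p => p.2 != 0)).map (fun p => p.1)
      ++ [(pre.length : Int)]
  let gaps := (barriers.zip barriers.tail).map (fun p => p.2 - p.1 - 1)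
  match PySem.List.max? gaps (fun x => x) with
  | some m => m
  | none => 0  -- unreachable: barriers always has at least two elements

def df_largest_free_run_alt (disk : List Int) (total : Int) : Int :=
  dfMaxGap (PySem.List.slice disk none (some (max total 0)))

-- ===== PRECONDITION & SPEC =====
-- A raises IndexError exactly when total > len(disk); those inputs are excluded.
def Pre_df_largest_free_run (disk : List Int) (total : Int) : Prop :=
  total ≤ (disk.length : Int)
instance (disk : List Int) (total : Int) : Decidable (Pre_df_largest_free_run disk total) := by
  unfold Pre_df_largest_free_run; infer_instance

def pvWitness_df_largest_free_run : List Int × Int := ([0, 1, 0, 0], 4)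

def Spec_df_largest_free_run (disk : List Int) (total : Int) (out : Int) : Prop := out = df_largest_free_run_alt disk total
instance (disk : List Int) (total : Int) (out : Int) : Decidable (Spec_df_largest_free_run disk total out) := by unfold Spec_df_largest_free_run; infer_instance

-- ===== CLAIM (what is proved, stated in full; the proofs are below) =====
def Claim_equal_df_largest_free_run : Prop := ∀ (disk : List Int) (total : Int), Dom_df_largest_free_run disk total → Pre_df_largest_free_run disk total → Spec_df_largest_free_run disk total (df_largest_free_run disk total)

-- ===== LEMMAS AND PROOFS =====

-- common intermediate spec: (largest zero run, leading zero run)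
def pvGo : List Int → Int × Int
  | [] => (0, 0)
  | x :: xs =>
    let p := pvGo xs
    if x = 0 then (max p.1 (p.2 + 1), p.2 + 1) else (p.1, 0)

lemma pvGo_nonneg (xs : List Int) : 0 ≤ (pvGo xs).2 ∧ (pvGo xs).2 ≤ (pvGo xs).1 := by
  induction xs with
  | nil => simp [pvGo]
  | cons x xs ih =>
    simp only [pvGo]
    split_ifs <;> simp <;> try omega

-- A's loop on the materialised prefix
def pvLoopL : List Int → Int → Int → Int
  | [], best, _ => best
  | b :: xs, best, current =>
    if b = 0 then pvLoopL xs (if current + 1 > best then current + 1 else best) (current + 1)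
    else pvLoopL xs best 0

lemma dfLoopA_eq_loopL (disk : List Int) :
    ∀ (fuel i : Nat) (best current : Int), i + fuel ≤ disk.length →
      dfLoopA disk fuel (i : Int) best current = pvLoopL ((disk.drop i).take fuel) best current := by
  intro fuel
  induction fuel with
  | zero => intro i best current _; simp [dfLoopA, pvLoopL]
  | succ fuel ih =>
    intro i best current h
    have hi : i < disk.length := by omega
    rw [List.drop_eq_getElem_cons hi, List.take_succ_cons]
    simp only [dfLoopA, PySem.List.pyGet?_natCast, List.getElem?_eq_getElem hi]
    have hcast : (i : Int) + 1 = ((i + 1 : Nat) : Int) := by push_cast; ring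
    by_cases hb : disk[i] = 0 <;>
      simp only [pvLoopL, hb, if_true, if_false, hcast] <;>
      rw [ih (i + 1) _ _ (by omega)]

-- best-so-far folds out of the loop
def pvM : List Int → Int → Int
  | [], _ => 0
  | b :: xs, cur => if b = 0 then max (cur + 1) (pvM xs (cur + 1)) else pvM xs 0

lemma loopL_eq_max (xs : List Int) :
    ∀ best cur : Int, 0 ≤ best → pvLoopL xs best cur = max best (pvM xs cur) := by
  induction xs with
  | nil => intro best cur h; simp [pvLoopL, pvM]; omega
  | cons b xs ih =>
    intro best cur h
    by_cases hb : b = 0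
    · simp only [pvLoopL, pvM, hb, if_true]
      rw [ih _ _ (by omega)]
      have : (if cur + 1 > best then cur + 1 else best) = max best (cur + 1) := by omega
      rw [this]; omega
    · simp only [pvLoopL, pvM, hb, if_false]
      exact ih _ _ h

lemma pvM_eq_go (xs : List Int) :
    ∀ cur : Int, 0 ≤ cur →
      pvM xs cur = if (pvGo xs).2 = 0 then (pvGo xs).1 else max (pvGo xs).1 (cur + (pvGo xs).2) := by
  induction xs with
  | nil => intro cur _; simp [pvM, pvGo]
  | cons b xs ih =>
    intro cur hcur
    have hnn := pvGo_nonneg xs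
    by_cases hb : b = 0
    · simp only [pvM, pvGo, hb, if_true]
      rw [ih (cur + 1) (by omega)]
      split_ifs <;> simp_all <;> omega
    · simp only [pvM, pvGo, hb, if_false, reduceIte]
      rw [ih 0 le_rfl]
      split_ifs <;> simp_all

-- ---------- B side ----------

-- adjacent differences (the gaps)
def pvDiffs : Int → List Int → List Int
  | _, [] => []
  | prev, y :: ys => (y - prev - 1) :: pvDiffs y ys

lemma zip_map_eq_diffs (ys : List Int) :
    ∀ prev : Int, ((prev :: ys).zip ys).map (fun p => p.2 - p.1 - 1) = pvDiffs prev ys := by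
  induction ys with
  | nil => intro prev; simp [pvDiffs]
  | cons y ys ih => intro prev; simp [pvDiffs, ih y]

def pvNz (s : Int) (xs : List Int) : List Int :=
  ((PySem.List.enumerate xs s).filter (fun p => p.2 != 0)).map (fun p => p.1)

lemma pvNz_cons (s : Int) (x : Int) (xs : List Int) :
    pvNz s (x :: xs) = (if x = 0 then [] else [s]) ++ pvNz (s + 1) xs := by
  by_cases hx : x = 0 <;> simp [pvNz, PySem.List.enumerate_cons, hx]

-- main invariant: gaps of the fenced barrier list describe pvGo
lemma barrier_invariant (xs : List Int) :
    ∀ s : Int,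
      (pvNz s xs ++ [s + (xs.length : Int)]).head? = some (s + (pvGo xs).2) ∧
      (pvGo xs).1 ∈ pvDiffs (s - 1) (pvNz s xs ++ [s + (xs.length : Int)]) ∧
      (∀ y ∈ pvDiffs (s - 1) (pvNz s xs ++ [s + (xs.length : Int)]), y ≤ (pvGo xs).1) := by
  induction xs with
  | nil =>
    intro s
    simp [pvNz, PySem.List.enumerate_nil, pvGo, pvDiffs]
  | cons x xs ih =>
    intro s
    have hnn := pvGo_nonneg xs
    obtain ⟨ihh, ihm, ihb⟩ := ih (s + 1)
    set L := (pvGo xs).2 with hL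
    set B := (pvGo xs).1 with hB
    -- the tail list is nonempty with known head
    obtain ⟨h, rest, hrest⟩ : ∃ h rest, pvNz (s + 1) xs ++ [(s + 1) + (xs.length : Int)] = h :: rest := by
      cases hc : pvNz (s + 1) xs ++ [(s + 1) + (xs.length : Int)] with
      | nil => simp at hc
      | cons a b => exact ⟨a, b, rfl⟩
    have hhead : h = s + 1 + L := by
      rw [hrest] at ihh; simpa using ihh
    have hlen : s + ((x :: xs).length : Int) = (s + 1) + (xs.length : Int) := by
      simp; ring
    by_cases hx : x = 0
    · -- free block: barriers unchanged except the implicit shift of the start fence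
      have hlist : pvNz s (x :: xs) ++ [s + ((x :: xs).length : Int)]
          = h :: rest := by
        rw [pvNz_cons, if_pos hx, List.nil_append, hlen, hrest]
      have hgo2 : (pvGo (x :: xs)).2 = L + 1 := by simp [pvGo, hx, hL]
      have hgo1 : (pvGo (x :: xs)).1 = max B (L + 1) := by simp [pvGo, hx, hL, hB]
      refine ⟨?_, ?_, ?_⟩
      · rw [hlist, hgo2]; simp [hhead]; ring
      · rw [hlist, hgo1]
        rw [hrest] at ihm
        simp only [pvDiffs, List.mem_cons] at ihm ⊢
        rcases ihm with hBeq | hBtail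
        · left; omega
        · by_cases hcmp : B ≤ L + 1
          · left; omega
          · right
            have : max B (L + 1) = B := by omega
            rw [this]; exact hBtail
      · rw [hlist, hgo1]
        rw [hrest] at ihb
        intro y hy
        simp only [pvDiffs, List.mem_cons] at hy ihb
        rcases hy with hy | hy
        · omega
        · have := ihb y (Or.inr hy); omega
    · -- occupied block at position s: gap 0, then the old gaps
      have hlist : pvNz s (x :: xs) ++ [s + ((x :: xs).length : Int)]
          = s :: (h :: rest) := by
        rw [pvNz_cons, if_neg hx, hlen, List.append_assoc, hrest]; simp
      have hgo2 : (pvGo (x :: xs)).2 = 0 := by simp [pvGo, hx]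
      have hgo1 : (pvGo (x :: xs)).1 = B := by simp [pvGo, hx, hB]
      rw [hrest] at ihm ihb
      simp only [pvDiffs, List.mem_cons] at ihm ihb
      refine ⟨?_, ?_, ?_⟩
      · rw [hlist, hgo2]; simp
      · rw [hlist, hgo1]
        simp only [pvDiffs, List.mem_cons]
        rcases ihm with hm | hm
        · right; left; omega
        · right; right; exact hm
      · rw [hlist, hgo1]
        intro y hy
        simp only [pvDiffs, List.mem_cons] at hy
        rcases hy with hy | hy | hy
        · omega
        · have := ihb y (Or.inl (by omega : y = h - (s + 1 - 1) - 1)); omega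
        · exact ihb y (Or.inr hy)

lemma max?_id_eq (xs : List Int) (v : Int) (hv : v ∈ xs) (hub : ∀ y ∈ xs, y ≤ v) :
    PySem.List.max? xs (fun x => x) = some v := by
  cases h : PySem.List.max? xs (fun x => x) with
  | none =>
    rw [PySem.List.max?_eq_none_iff] at h
    subst h; simp at hv
  | some m =>
    have hm : m ∈ xs := PySem.List.max?_mem h
    have h1 : v ≤ m := PySem.List.max?_isMax h v hv
    have h2 : m ≤ v := hub m hm
    rw [le_antisymm h2 h1]

lemma dfMaxGap_eq_go (pre : List Int) : dfMaxGap pre = (pvGo pre).1 := by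
  obtain ⟨_, hmem, hub⟩ := barrier_invariant pre 0
  have hz0 : (0 : Int) - 1 = -1 := by norm_num
  rw [hz0] at hmem hub
  simp only [zero_add] at hmem hub
  have hzip : (((-1 : Int) :: (pvNz 0 pre ++ [(pre.length : Int)])).zip
        (pvNz 0 pre ++ [(pre.length : Int)])).map (fun p => p.2 - p.1 - 1)
      = pvDiffs (-1) (pvNz 0 pre ++ [(pre.length : Int)]) :=
    zip_map_eq_diffs _ (-1)
  have hbar : ((PySem.List.enumerate pre 0).filter (fun p => p.2 != 0)).map (fun p => p.1)
      = pvNz 0 pre := rfl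
  simp only [dfMaxGap, List.cons_append, List.nil_append, List.tail_cons, hbar]
  rw [hzip, max?_id_eq _ _ hmem hub]

-- ===== VERDICT (by name: the statement is the Claim_ definition above) =====
theorem df_largest_free_run_spec : Claim_equal_df_largest_free_run := by
  intro disk total _ hpre
  unfold Spec_df_largest_free_run df_largest_free_run df_largest_free_run_alt
  unfold Pre_df_largest_free_run at hpre
  have hmax : 0 ≤ max total 0 := le_max_right _ _
  rw [PySem.List.slice_to _ hmax]
  have htoNat : (max total 0).toNat = total.toNat := by omega
  rw [htoNat, dfMaxGap_eq_go]
  have hfuel : (0 : Nat) + total.toNat ≤ disk.length := by omega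
  have h0 : ((0 : Nat) : Int) = (0 : Int) := rfl
  have := dfLoopA_eq_loopL disk total.toNat 0 0 0 hfuel
  rw [h0] at this
  rw [this]
  simp only [List.drop_zero]
  rw [loopL_eq_max _ 0 0 le_rfl, pvM_eq_go _ 0 le_rfl]
  have := pvGo_nonneg (disk.take total.toNat)
  split_ifs <;> omega
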